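-- pv_equiv track=rewrite | github.com/danhenriquesc/hackerrank | cracking_the_coding_interview/data_structures/strings_making_anagrams.py | number_needed
-- ===== SOURCE A (Python) =====
-- import string
-- from collections import Counter
--
-- def number_needed(a, b):
--     letters = list(string.ascii_lowercase)
--
--     a_freq = Counter(a.strip())
--     b_freq = Counter(b.strip())
--
--     count = 0
--     for letter in letters:
--         count += abs(a_freq.get(letter, 0) - b_freq.get(letter, 0))
--
--     return count
-- ===== SOURCE B (Python) =====
-- def number_needed(a, b):
--     s = sorted(c for c in a.strip() if 'a' <= c <= 'z')
--     t = sorted(c for c in b.strip() if 'a' <= c <= 'z')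
--     i = j = count = 0
--     while i < len(s) and j < len(t):
--         if s[i] < t[j]:
--             count += 1
--             i += 1
--         elif s[i] > t[j]:
--             count += 1
--             j += 1
--         else:
--             i += 1
--             j += 1
--     return count + (len(s) - i) + (len(t) - j)
-- ===== Notes on version B (the rewrite author's own statement) =====
-- stated objective: alternative
-- what changed: B drops the Counter frequency tables and the fixed 26-letter abs-difference scan entirely: it sorts the lowercase-filtered characters of each stripped string and counts the deletions with a two-pointer merge over the two sorted sequences.
import Mathlib
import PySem

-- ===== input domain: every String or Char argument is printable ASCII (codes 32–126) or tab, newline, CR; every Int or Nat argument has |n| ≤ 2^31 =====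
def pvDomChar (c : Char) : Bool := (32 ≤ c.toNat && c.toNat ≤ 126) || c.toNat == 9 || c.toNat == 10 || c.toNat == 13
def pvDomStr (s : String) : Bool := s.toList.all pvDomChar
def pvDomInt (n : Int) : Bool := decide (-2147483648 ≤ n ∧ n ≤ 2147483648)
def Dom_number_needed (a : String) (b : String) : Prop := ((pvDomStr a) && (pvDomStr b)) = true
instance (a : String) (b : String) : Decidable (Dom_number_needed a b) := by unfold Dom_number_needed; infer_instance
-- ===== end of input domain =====

-- B replaces A's Counter-plus-26-letter scan by sorting the lowercase-filtered strings and
-- counting mismatches with a two-pointer merge (alternative algorithm, no frequency table).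


-- ===== PORT A =====
-- list(string.ascii_lowercase)
def asciiLowercase : List Char :=
  ['a','b','c','d','e','f','g','h','i','j','k','l','m',
   'n','o','p','q','r','s','t','u','v','w','x','y','z']

def number_needed (a : String) (b : String) : Int :=
  let letters := asciiLowercase
  let aFreq := PySem.Dict.counter (PySem.Str.strip a).toList
  let bFreq := PySem.Dict.counter (PySem.Str.strip b).toList
  letters.foldl (fun count letter => count + |aFreq.getD letter 0 - bFreq.getD letter 0|) 0

-- ===== PORT B =====
-- 'a' <= c <= 'z'
def isLowerAZ (c : Char) : Bool := 'a' ≤ c && c ≤ 'z'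

-- the while loop of Source B: two cursors over the sorted lists, counting mismatched heads;
-- when one side is exhausted the remainders' lengths are added (count + (len s - i) + (len t - j))
def mergeLoop : List Char → List Char → Int → Int
  | [], t, count => count + t.length
  | s, [], count => count + s.length
  | x :: s, y :: t, count =>
      if x < y then mergeLoop s (y :: t) (count + 1)
      else if y < x then mergeLoop (x :: s) t (count + 1)
      else mergeLoop s t count

def number_needed_alt (a : String) (b : String) : Int :=
  let s := PySem.List.sorted ((PySem.Str.strip a).toList.filter isLowerAZ) (fun c => c) false
  let t := PySem.List.sorted ((PySem.Str.strip b).toList.filter isLowerAZ) (fun c => c) false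
  mergeLoop s t 0

-- ===== PRECONDITION & SPEC =====
def Spec_number_needed (a : String) (b : String) (out : Int) : Prop := out = number_needed_alt a b
instance (a : String) (b : String) (out : Int) : Decidable (Spec_number_needed a b out) := by unfold Spec_number_needed; infer_instance

-- ===== CLAIM (what is proved, stated in full; the proofs are below) =====
def Claim_equal_number_needed : Prop := ∀ (a : String) (b : String), Dom_number_needed a b → Spec_number_needed a b (number_needed a b)

-- ===== LEMMAS AND PROOFS =====

-- every char satisfying 'a' ≤ c ≤ 'z' is in the literal alphabet list
lemma mem_ascii_of_isLower (c : Char) (h : isLowerAZ c = true) : c ∈ asciiLowercase := by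
  simp only [isLowerAZ, Bool.and_eq_true, decide_eq_true_eq] at h
  have h1 : (97:Nat) ≤ c.toNat := Fin.mk_le_mk.mp h.1
  have h2 : c.toNat ≤ 122 := Fin.mk_le_mk.mp h.2
  have hc := Char.ofNat_toNat c
  interval_cases hn : c.toNat <;> (rw [← hc]; decide)

lemma isLower_of_mem_ascii (c : Char) (h : c ∈ asciiLowercase) : isLowerAZ c = true := by
  fin_cases h <;> decide

lemma map_sum_add (l : List Char) (f g : Char → Int) :
    (l.map f).sum + (l.map g).sum = (l.map (fun c => f c + g c)).sum := by
  induction l with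
  | nil => simp
  | cons x xs ih => simp only [List.map_cons, List.sum_cons, ← ih]; ring

-- the indicator of one alphabet letter sums to 1 over the alphabet
lemma sum_indicator (x : Char) (hx : x ∈ asciiLowercase) :
    (asciiLowercase.map (fun c => if c = x then (1:Int) else 0)).sum = 1 := by
  have hnd : asciiLowercase.Nodup := by decide
  rw [← List.sum_toFinset _ hnd, Finset.sum_ite_eq']
  simp [List.mem_toFinset.mpr hx]

lemma sum_succ_at (x : Char) (hx : x ∈ asciiLowercase) (f g : Char → Int)
    (h : ∀ c ∈ asciiLowercase, f c = g c + (if c = x then 1 else 0)) :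
    (asciiLowercase.map f).sum = (asciiLowercase.map g).sum + 1 := by
  rw [List.map_congr_left h, ← map_sum_add, sum_indicator x hx]

-- the length of a list of alphabet letters is the sum of its per-letter counts
lemma length_eq_sum_counts (t : List Char) (h : ∀ c ∈ t, c ∈ asciiLowercase) :
    (t.length : Int) = (asciiLowercase.map (fun c => (t.count c : Int))).sum := by
  induction t with
  | nil => simp
  | cons x xs ih =>
      have hx : x ∈ asciiLowercase := h x (List.mem_cons_self ..)
      have ihh := ih (fun c hc => h c (List.mem_cons_of_mem _ hc))
      have := sum_succ_at x hx (fun c => ((x :: xs).count c : Int)) (fun c => (xs.count c : Int))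
        (fun c _ => by
          by_cases hcx : c = x
          · subst hcx; simp [List.count_cons_self]
          · simp [List.count_cons_of_ne (fun he => hcx he.symm), hcx])
      simp only [List.length_cons, this]
      omega

-- a sorted list with head y contains no character below y
lemma count_eq_zero_of_lt_head (x y : Char) (t : List Char)
    (ht : (y :: t).Pairwise (· ≤ ·)) (hxy : x < y) : (y :: t).count x = 0 := by
  refine List.count_eq_zero.mpr (fun hm => ?_)
  rcases List.mem_cons.mp hm with h | h
  · exact absurd h (ne_of_lt hxy)
  · exact absurd ((List.pairwise_cons.mp ht).1 x h) (not_le.mpr hxy)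

-- the merge loop computes the per-letter absolute count differences
lemma mergeLoop_eq (s t : List Char) (k : Int)
    (hs : s.Pairwise (· ≤ ·)) (ht : t.Pairwise (· ≤ ·))
    (hsa : ∀ c ∈ s, c ∈ asciiLowercase) (hta : ∀ c ∈ t, c ∈ asciiLowercase) :
    mergeLoop s t k
      = k + (asciiLowercase.map (fun c => |((s.count c : Int)) - (t.count c : Int)|)).sum := by
  fun_induction mergeLoop s t k with
  | case1 t count =>
      rw [length_eq_sum_counts t hta]
      simp
  | case2 s count =>
      rw [length_eq_sum_counts s hsa]
      congr 1
      exact congrArg List.sum (List.map_congr_left (fun c _ => by simp))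
  | case3 x s y t count hlt ih =>
      have hzero : (y :: t).count x = 0 := count_eq_zero_of_lt_head x y t ht hlt
      rw [ih (List.Pairwise.of_cons hs) ht
          (fun c hc => hsa c (List.mem_cons_of_mem _ hc)) hta]
      have hstep := sum_succ_at x (hsa x (List.mem_cons_self ..))
        (fun c => |(((x :: s).count c : Int)) - ((y :: t).count c : Int)|)
        (fun c => |((s.count c : Int)) - ((y :: t).count c : Int)|)
        (fun c _ => by
          beta_reduce
          by_cases hcx : c = x
          · subst hcx
            simp only [List.count_cons_self, hzero]
            push_cast
            rw [abs_eq_max_neg, abs_eq_max_neg]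
            omega
          · have hxc : ¬ x = c := fun he => hcx he.symm
            simp [List.count_cons, hxc, hcx])
      rw [hstep]; ring
  | case4 x s y t count hnlt hlt ih =>
      have hzero : (x :: s).count y = 0 := count_eq_zero_of_lt_head y x s hs hlt
      rw [ih hs (List.Pairwise.of_cons ht) hsa
          (fun c hc => hta c (List.mem_cons_of_mem _ hc))]
      have hstep := sum_succ_at y (hta y (List.mem_cons_self ..))
        (fun c => |(((x :: s).count c : Int)) - ((y :: t).count c : Int)|)
        (fun c => |(((x :: s).count c : Int)) - (t.count c : Int)|)
        (fun c _ => by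
          beta_reduce
          by_cases hcy : c = y
          · subst hcy
            simp only [List.count_cons_self, hzero]
            push_cast
            rw [abs_eq_max_neg, abs_eq_max_neg]
            omega
          · have hyc : ¬ y = c := fun he => hcy he.symm
            simp [List.count_cons, hyc, hcy])
      rw [hstep]; ring
  | case5 x s y t count hnlt hnlt' ih =>
      have hxy : x = y := le_antisymm (not_lt.mp hnlt') (not_lt.mp hnlt)
      subst hxy
      rw [ih (List.Pairwise.of_cons hs) (List.Pairwise.of_cons ht)
          (fun c hc => hsa c (List.mem_cons_of_mem _ hc))
          (fun c hc => hta c (List.mem_cons_of_mem _ hc))]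
      congr 1
      refine congrArg List.sum (List.map_congr_left (fun c _ => ?_))
      beta_reduce
      by_cases hcx : c = x
      · subst hcx; simp only [List.count_cons_self]; push_cast; ring_nf
      · have hxc : ¬ x = c := fun he => hcx he.symm
        simp [hxc]

-- ===== VERDICT (by name: the statement is the Claim_ definition above) =====
theorem number_needed_spec : Claim_equal_number_needed := by
  intro a b _
  unfold Spec_number_needed number_needed number_needed_alt
  rw [PySem.List.foldl_add]
  simp only [PySem.Dict.getD_counter, zero_add]
  set u := (PySem.Str.strip a).toList
  set v := (PySem.Str.strip b).toList
  set su := PySem.List.sorted (u.filter isLowerAZ) (fun c => c) false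
  set sv := PySem.List.sorted (v.filter isLowerAZ) (fun c => c) false
  have hpu : su.Perm (u.filter isLowerAZ) := PySem.List.sorted_perm ..
  have hpv : sv.Perm (v.filter isLowerAZ) := PySem.List.sorted_perm ..
  rw [mergeLoop_eq su sv 0
      (PySem.List.sorted_pairwise ..)
      (PySem.List.sorted_pairwise ..)
      (fun c hc => mem_ascii_of_isLower c (List.of_mem_filter (hpu.mem_iff.mp hc)))
      (fun c hc => mem_ascii_of_isLower c (List.of_mem_filter (hpv.mem_iff.mp hc)))]
  rw [zero_add]
  refine congrArg List.sum (List.map_congr_left (fun c hc => ?_))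
  rw [hpu.count_eq, hpv.count_eq]
  simp [List.count_filter, isLower_of_mem_ascii c hc]
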